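-- pv_equiv track=rewrite | github.com/mariadelaorden/Problemas-Tema-3 | ejercicio4.py | emparejar
-- ===== SOURCE A (Python) =====
-- def emparejar(elemento : int, lista : list[int]) -> list[tuple[int, int]]:
--     """ Función que empareja un elemento con los elementos de una lista dividiéndola en dos partes """
--     if not lista:
--         return []
--
--     # Divido la lista en dos partes
--     medio = len(lista) // 2
--
--     izquierda = lista[: medio]
--     derecha = lista [medio : ]
--
--     if derecha and elemento == derecha[0]:
--         return [(elemento, derecha[0])] # si la lista derecha no está vacía compara el primer elemento de la lista de la derecha, si es igual, lo empareja
--     elif izquierda and elemento == izquierda[-1]: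
--         return [(elemento, izquierda[-1])] # si la lista izquierda no está vacía compara el último elemento de la lista de la izquierda, si es igual, lo empareja
--     elif izquierda and derecha : # si la lista izquierda y la derecha no están vacías
--         if elemento < derecha[0]:
--             return emparejar(elemento, izquierda) # compara el primer elemento de la lista de la derecha, si es menor es que se encuentra en la lista de la izquierda
--         elif elemento > izquierda[-1]:
--             return emparejar(elemento, derecha) # compara el último elemento de la lista de la izquierda, si es mayor es que se encuentra en la lista de la derecha
--
--     return []
-- ===== SOURCE B (Python) =====
-- def emparejar(elemento: int, lista: list[int]) -> list[tuple[int, int]]: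
--     """Iterative binary-search pairing over a half-open window [lo, hi)."""
--     lo, hi = 0, len(lista)
--     while lo < hi:
--         medio = (hi - lo) // 2
--         mid = lo + medio
--         if elemento == lista[mid]:
--             return [(elemento, lista[mid])]
--         if medio > 0 and elemento == lista[mid - 1]:
--             return [(elemento, lista[mid - 1])]
--         if medio > 0:
--             if elemento < lista[mid]:
--                 hi = mid
--             elif elemento > lista[mid - 1]:
--                 lo = mid
--             else:
--                 return []
--         else:
--             return []
--     return []
-- ===== Notes on version B (the rewrite author's own statement) =====
-- stated objective: alternative
-- what changed: Replaced A's recursion on freshly created left/right slice lists by an iterative binary search over a half-open index window [lo, hi) on the original list, so no sublists are allocated.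
import Mathlib
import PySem

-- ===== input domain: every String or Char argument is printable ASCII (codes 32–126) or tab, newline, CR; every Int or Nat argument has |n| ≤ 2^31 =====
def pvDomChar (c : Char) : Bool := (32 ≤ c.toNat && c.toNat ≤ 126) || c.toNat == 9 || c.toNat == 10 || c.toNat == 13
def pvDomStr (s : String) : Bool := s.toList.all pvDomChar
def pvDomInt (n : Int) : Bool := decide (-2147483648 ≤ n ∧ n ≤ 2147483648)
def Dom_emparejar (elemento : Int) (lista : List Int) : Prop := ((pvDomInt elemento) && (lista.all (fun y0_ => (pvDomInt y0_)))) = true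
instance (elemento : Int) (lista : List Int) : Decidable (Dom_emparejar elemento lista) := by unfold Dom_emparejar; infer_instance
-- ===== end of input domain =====

-- B replaces A's recursion on copied half-slices by an iterative binary search over an
-- index window [lo, hi) on the original list (objective: alternative, no slice allocation).

-- ===== PORT A =====
-- medio = len(lista) // 2 : the length is a Nat, so Python's floor division is Nat division — exact.
-- derecha[0] / izquierda[-1] are only evaluated under their nonemptiness guards, so pyGetD is exact.
def emparejar (elemento : Int) (lista : List Int) : List (Int × Int) :=
  if lista = [] then []
  else
    let medio : Nat := lista.length / 2
    let izquierda := PySem.List.slice lista none (some (medio : Int))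
    let derecha := PySem.List.slice lista (some (medio : Int)) none
    if derecha ≠ [] ∧ elemento = PySem.List.pyGetD derecha 0 0 then
      [(elemento, PySem.List.pyGetD derecha 0 0)]
    else if izquierda ≠ [] ∧ elemento = PySem.List.pyGetD izquierda (-1) 0 then
      [(elemento, PySem.List.pyGetD izquierda (-1) 0)]
    else if izquierda ≠ [] ∧ derecha ≠ [] then
      if elemento < PySem.List.pyGetD derecha 0 0 then
        emparejar elemento izquierda
      else if elemento > PySem.List.pyGetD izquierda (-1) 0 then
        emparejar elemento derecha
      else []
    else []
termination_by lista.length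
decreasing_by
  · simp only [PySem.List.slice_to_natCast, List.length_take]
    have : lista.length ≠ 0 := by simpa [List.length_eq_zero_iff] using ‹¬ lista = []›
    omega
  · simp only [PySem.List.slice_from_natCast, List.length_drop]
    have hiz : izquierda ≠ [] := by exact ‹izquierda ≠ [] ∧ derecha ≠ []›.1
    have : medio ≠ 0 := by
      intro h
      exact hiz (by simp [izquierda, h])
    omega

-- ===== PORT B =====
-- The Python while-loop on (lo, hi); lo and hi are nonnegative ints throughout (0 ≤ lo < hi ≤ len),
-- ported as Nat. lista[mid] / lista[mid-1] are always in range in Python; pyGetD is exact there.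
def emparejarGo (elemento : Int) (lista : List Int) (lo hi : Nat) : List (Int × Int) :=
  if lo < hi then
    let medio : Nat := (hi - lo) / 2
    let mid : Nat := lo + medio
    if elemento = PySem.List.pyGetD lista (mid : Int) 0 then
      [(elemento, PySem.List.pyGetD lista (mid : Int) 0)]
    else if medio > 0 ∧ elemento = PySem.List.pyGetD lista ((mid : Int) - 1) 0 then
      [(elemento, PySem.List.pyGetD lista ((mid : Int) - 1) 0)]
    else if medio > 0 then
      if elemento < PySem.List.pyGetD lista (mid : Int) 0 then
        emparejarGo elemento lista lo mid
      else if elemento > PySem.List.pyGetD lista ((mid : Int) - 1) 0 then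
        emparejarGo elemento lista mid hi
      else []
    else []
  else []
termination_by hi - lo
decreasing_by
  · omega
  · omega

def emparejar_alt (elemento : Int) (lista : List Int) : List (Int × Int) :=
  emparejarGo elemento lista 0 lista.length

-- ===== PRECONDITION & SPEC =====
def Spec_emparejar (elemento : Int) (lista : List Int) (out : List (Int × Int)) : Prop := out = emparejar_alt elemento lista
instance (elemento : Int) (lista : List Int) (out : List (Int × Int)) : Decidable (Spec_emparejar elemento lista out) := by unfold Spec_emparejar; infer_instance

-- ===== CLAIM (what is proved, stated in full; the proofs are below) =====
def Claim_equal_emparejar : Prop := ∀ (elemento : Int) (lista : List Int), Dom_emparejar elemento lista → Spec_emparejar elemento lista (emparejar elemento lista)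

-- ===== LEMMAS AND PROOFS =====

-- The window [lo, hi) of B computes exactly what A computes on the slice lista[lo:hi].
theorem go_eq_window (elemento : Int) (lista : List Int) :
    ∀ (fuel lo hi : Nat), hi - lo ≤ fuel → hi ≤ lista.length →
      emparejarGo elemento lista lo hi =
        emparejar elemento ((lista.drop lo).take (hi - lo)) := by
  intro fuel
  induction fuel with
  | zero =>
      intro lo hi hf hlen
      have h : ¬ lo < hi := by omega
      rw [emparejarGo, emparejar]
      simp [h, show hi - lo = 0 by omega]
  | succ fuel ih =>
      intro lo hi hf hlen
      by_cases h : lo < hi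
      case neg =>
        rw [emparejarGo, emparejar]
        simp [h, show hi - lo = 0 by omega]
      case pos =>
      rw [emparejarGo, emparejar]
      simp only [if_pos h]
      set w := List.take (hi - lo) (List.drop lo lista) with hw
      have hwlen : w.length = hi - lo := by simp [hw]; omega
      have hwne : ¬ w = [] := by
        intro he; rw [he] at hwlen; simp at hwlen; omega
      rw [if_neg hwne, hwlen]
      set medio := (hi - lo) / 2 with hmedio
      rw [PySem.List.slice_from_natCast, PySem.List.slice_to_natCast]
      have hmlt : medio < hi - lo := by omega
      have hget : ∀ k, k < hi - lo → w[k]? = lista[lo + k]? := by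
        intro k hk
        rw [hw, List.getElem?_take_of_lt hk, List.getElem?_drop]
      have hderne : List.drop medio w ≠ [] := by
        intro he; have := congrArg List.length he; simp [hwlen] at this; omega
      have hd0 : PySem.List.pyGetD (List.drop medio w) 0 0
          = PySem.List.pyGetD lista ((lo + medio : Nat) : Int) 0 := by
        rw [PySem.List.pyGetD_zero, PySem.List.pyGetD_natCast]
        simp only [List.getD_eq_getElem?_getD, List.getElem?_drop, Nat.add_zero]
        rw [hget medio hmlt]
      by_cases hm0 : medio > 0
      · -- left half nonempty
        have hizne : List.take medio w ≠ [] := by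
          intro he; have := congrArg List.length he; simp [hwlen] at this; omega
        have hizlen : (List.take medio w).length = medio := by
          simp [hwlen]; omega
        have hlast : PySem.List.pyGetD (List.take medio w) (-1) 0
            = PySem.List.pyGetD lista (((lo + medio : Nat) : Int) - 1) 0 := by
          rw [PySem.List.pyGetD_neg_one _ _ hizne,
              show ((lo + medio : Nat) : Int) - 1 = ((lo + medio - 1 : Nat) : Int) by omega,
              PySem.List.pyGetD_natCast, List.getLast_eq_getElem]
          have hlt : medio - 1 < (List.take medio w).length := by omega
          have hlt2 : medio - 1 < hi - lo := by omega
          simp only [hizlen]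
          rw [List.getElem_take]
          have := hget (medio - 1) hlt2
          rw [List.getD_eq_getElem?_getD, show lo + medio - 1 = lo + (medio - 1) by omega, ← this]
          rw [List.getElem?_eq_getElem (by omega)]
          rfl
        simp only [hd0, hlast, ne_eq, hderne, hizne, hm0, not_false_eq_true, true_and]
        split_ifs with h1 h2 h3 h4
        · rfl
        · rfl
        · -- recurse into the left half
          rw [ih lo (lo + medio) (by omega) (by omega)]
          rw [show lo + medio - lo = medio by omega, hw, List.take_take]
          rw [Nat.min_eq_left (by omega)]
        · -- recurse into the right half
          rw [ih (lo + medio) hi (by omega) hlen]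
          rw [hw, List.drop_take, List.drop_drop]
          congr 2
          all_goals omega
        · rfl
      · -- medio = 0 : single-element window
        have hm : medio = 0 := by omega
        have hd0' : PySem.List.pyGetD w 0 0 = lista[lo]?.getD 0 := by
          rw [PySem.List.pyGetD_zero, List.getD_eq_getElem?_getD]
          have := hget 0 (by omega)
          rw [Nat.add_zero] at this
          rw [this]
        simp [hm, hwne, hd0']

-- ===== VERDICT (by name: the statement is the Claim_ definition above) =====
theorem emparejar_spec : Claim_equal_emparejar := by
  intro elemento lista _
  unfold Spec_emparejar emparejar_alt
  rw [go_eq_window elemento lista lista.length 0 lista.length (by omega) (by omega)]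
  simp
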